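-- pv_equiv track=rewrite | github.com/minkaas/AdventOfCode_2 | 2023/Day14/Day14.py | calc_northbeams
-- ===== SOURCE A (Python) =====
-- def calc_northbeams(platform):
--     result = 0
--     for i in range(len(platform[0])):
--         column_total = 0
--         row_load = len(platform)
--         for j in range(len(platform)):
--             if platform[j][i] == 2:
--                 column_total += row_load
--             row_load -= 1
--         result += column_total
--     return result
-- ===== SOURCE B (Python) =====
-- def calc_northbeams(platform):
--     width = len(platform[0])
--     running = 0
--     total = 0
--     for row in platform:
--         running += row[:width].count(2)
--         total += running
--     return total
-- ===== Notes on version B (the rewrite author's own statement) =====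
-- stated objective: faster
-- what changed: Replaces A's column-major weighted double loop (decrementing row_load, per-column accumulator) with a prefix-sum pass: one traversal over rows keeping a running count of rocks seen so far and summing that running count, counting each row with row[:width].count(2) -- no weights and no multiplication.
import Mathlib
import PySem

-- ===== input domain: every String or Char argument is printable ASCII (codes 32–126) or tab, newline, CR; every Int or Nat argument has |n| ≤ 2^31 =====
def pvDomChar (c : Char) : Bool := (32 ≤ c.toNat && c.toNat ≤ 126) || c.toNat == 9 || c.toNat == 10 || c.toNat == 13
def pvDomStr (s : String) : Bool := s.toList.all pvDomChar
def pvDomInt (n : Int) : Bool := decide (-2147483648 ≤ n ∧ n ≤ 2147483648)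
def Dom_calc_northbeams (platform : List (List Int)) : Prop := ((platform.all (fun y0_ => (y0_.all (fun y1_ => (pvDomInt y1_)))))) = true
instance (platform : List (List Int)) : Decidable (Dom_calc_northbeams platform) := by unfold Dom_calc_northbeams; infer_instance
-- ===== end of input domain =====

-- B replaces A's column-major weighted double loop by a prefix-sum pass: it keeps a
-- running count of rocks seen so far and sums that running count row by row
-- (no per-row weight, no multiplication; the row count runs via list.count).

-- ===== PORT A =====
def calc_northbeams (platform : List (List Int)) : Int :=
  (PySem.List.pyRange 0 ((PySem.List.pyGetD platform 0 []).length : Int) 1).foldl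
    (fun result i =>
      result +
        ((PySem.List.pyRange 0 (platform.length : Int) 1).foldl
          (fun (st : Int × Int) j =>
            (if PySem.List.pyGetD (PySem.List.pyGetD platform j []) i 0 == 2 then st.1 + st.2
             else st.1,
             st.2 - 1))
          (0, (platform.length : Int))).1)
    0

-- ===== PORT B =====
def calc_northbeams_alt (platform : List (List Int)) : Int :=
  let width : Int := ((PySem.List.pyGetD platform 0 []).length : Int)
  (platform.foldl
    (fun (st : Int × Int) row =>
      let running := st.1 + (PySem.List.count (PySem.List.slice row (some 0) (some width)) 2 : Int)
      (running, st.2 + running))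
    (0, 0)).2

-- ===== PRECONDITION & SPEC =====
-- Pre_ excludes exactly the inputs where Python A raises IndexError: the empty
-- platform (platform[0]) and ragged inputs with a row shorter than row 0.
def Pre_calc_northbeams (platform : List (List Int)) : Prop :=
  platform ≠ [] ∧ ∀ row ∈ platform, (PySem.List.pyGetD platform 0 []).length ≤ row.length
instance (platform : List (List Int)) : Decidable (Pre_calc_northbeams platform) := by
  unfold Pre_calc_northbeams; infer_instance
def pvWitness_calc_northbeams : List (List Int) := [[2, 0], [1, 2]]

def Spec_calc_northbeams (platform : List (List Int)) (out : Int) : Prop := out = calc_northbeams_alt platform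
instance (platform : List (List Int)) (out : Int) : Decidable (Spec_calc_northbeams platform out) := by unfold Spec_calc_northbeams; infer_instance

-- ===== CLAIM (what is proved, stated in full; the proofs are below) =====
def Claim_equal_calc_northbeams : Prop := ∀ (platform : List (List Int)), Dom_calc_northbeams platform → Pre_calc_northbeams platform → Spec_calc_northbeams platform (calc_northbeams platform)

-- ===== LEMMAS AND PROOFS =====

-- a sum over a 0-based pyRange is a Finset.range sum
theorem pv_sum_pyRange (m : Nat) (f : Int → Int) :
    ((PySem.List.pyRange 0 (m : Int) 1).map f).sum = ∑ k ∈ Finset.range m, f k := by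
  rw [PySem.List.pyRange_one]
  induction m with
  | zero => simp
  | succ m ih =>
    rw [Finset.sum_range_succ]
    simp [List.range_succ] at *
    omega

-- A's inner column loop: paired state (accumulator, decrementing row_load)
theorem pv_A_inner (p : List (List Int)) (i : Int) (k : Nat) :
    ∀ (a s c : Int),
      ((PySem.List.pyRange a (a + k) 1).foldl
        (fun (st : Int × Int) j =>
          (if PySem.List.pyGetD (PySem.List.pyGetD p j []) i 0 == 2 then st.1 + st.2 else st.1,
           st.2 - 1))
        (s, c)).1
      = s + ∑ t ∈ Finset.range k,
          (if PySem.List.pyGetD (PySem.List.pyGetD p (a + t) []) i 0 == 2 then c - t else 0) := by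
  induction k with
  | zero => intro a s c; rw [show a + (0:Nat) = a by simp, PySem.List.pyRange_one_eq_nil le_rfl]; simp
  | succ k ih =>
    intro a s c
    rw [PySem.List.pyRange_one_cons (by push_cast; omega), List.foldl_cons]
    have h2 : a + ((k:Nat)+1 : Nat) = (a + 1) + (k : Nat) := by push_cast; ring
    rw [h2, ih (a+1) _ (c-1)]
    rw [Finset.sum_range_succ']
    have hsum : ∀ t ∈ Finset.range k,
        (if PySem.List.pyGetD (PySem.List.pyGetD p (a + 1 + (t:Int)) []) i 0 == 2 then c - 1 - (t:Int) else 0)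
        = (if PySem.List.pyGetD (PySem.List.pyGetD p (a + ((t+1 : Nat) : Int)) []) i 0 == 2 then c - ((t+1:Nat):Int) else 0) := by
      intro t _; push_cast; rw [show a + 1 + (t:Int) = a + ((t:Int)+1) by ring]
      split <;> [ring; rfl]
    rw [Finset.sum_congr rfl hsum]
    simp only [Nat.cast_zero, add_zero, sub_zero]
    split <;> ring

-- counting rocks in the first w cells: the 0/1 indicator sum IS the count of row[:w]
theorem pv_count_take (row : List Int) (w : Nat) (h : w ≤ row.length) :
    ∑ i ∈ Finset.range w, (if row.getD i 0 == 2 then (1:Int) else 0)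
      = ((row.take w).count 2 : Int) := by
  induction w with
  | zero => simp
  | succ w ih =>
    have hw : w < row.length := by omega
    rw [Finset.sum_range_succ, ih (by omega), List.take_add_one]
    have : row[w]? = some row[w] := List.getElem?_eq_getElem hw
    rw [this]
    simp only [Option.toList_some, List.count_append, List.count_cons, List.count_nil,
      List.getD_eq_getElem row 0 hw]
    push_cast
    split <;> simp_all

-- B's prefix-sum loop: summing the running count gives the weighted row sum
theorem pv_prefix_fold (f : List Int → Int) (xs : List (List Int)) :
    ∀ (r t : Int),
      (xs.foldl (fun (st : Int × Int) row =>
          let running := st.1 + f row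
          (running, st.2 + running)) (r, t)).2
      = t + (xs.length : Int) * r
        + ∑ k ∈ Finset.range xs.length, ((xs.length : Int) - k) * f (xs.getD k []) := by
  induction xs with
  | nil => intro r t; simp
  | cons x xs ih =>
    intro r t
    rw [List.foldl_cons]
    show (xs.foldl _ (r + f x, t + (r + f x))).2 = _
    rw [ih (r + f x) (t + (r + f x)), List.length_cons, Finset.sum_range_succ']
    simp only [Nat.cast_add, Nat.cast_one, Nat.cast_zero, List.getD_cons_zero, List.getD_cons_succ]
    rw [Finset.sum_congr rfl (fun (k : Nat) (_ : k ∈ Finset.range xs.length) =>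
      show ((xs.length:Int) + 1 - ((k:Int) + 1)) * f (xs.getD k []) = ((xs.length:Int) - (k:Int)) * f (xs.getD k []) by ring)]
    ring

-- the two ports agree on every input satisfying Pre_
theorem pv_ports_eq (platform : List (List Int)) (hpre : Pre_calc_northbeams platform) :
    calc_northbeams platform = calc_northbeams_alt platform := by
  obtain ⟨-, hw⟩ := hpre
  set w : Nat := (PySem.List.pyGetD platform 0 []).length with hwdef
  unfold calc_northbeams calc_northbeams_alt
  rw [PySem.List.foldl_add, pv_sum_pyRange, pv_prefix_fold]
  simp only [zero_add, mul_zero, add_zero, ← hwdef]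
  have hA : ∀ i : Int,
      ((PySem.List.pyRange 0 (platform.length : Int) 1).foldl
        (fun (st : Int × Int) j =>
          (if PySem.List.pyGetD (PySem.List.pyGetD platform j []) i 0 == 2 then st.1 + st.2
           else st.1, st.2 - 1))
        (0, (platform.length : Int))).1
      = ∑ t ∈ Finset.range platform.length,
          (if PySem.List.pyGetD (platform.getD t []) i 0 == 2 then (platform.length : Int) - t else 0) := by
    intro i
    have := pv_A_inner platform i platform.length 0 0 (platform.length : Int)
    simpa [PySem.List.pyGetD_natCast] using this
  rw [Finset.sum_congr rfl (fun (i : Nat) _ => hA (i : Int)), Finset.sum_comm]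
  refine Finset.sum_congr rfl (fun t ht => ?_)
  rw [Finset.mem_range] at ht
  have hrow : platform.getD t [] ∈ platform := by
    rw [List.getD_eq_getElem platform [] ht]; exact List.getElem_mem ht
  have hlen : w ≤ (platform.getD t []).length := hw _ hrow
  simp only [PySem.List.slice_zero_start, PySem.List.slice_to_natCast, PySem.List.count_eq]
  rw [← pv_count_take _ w hlen, Finset.mul_sum]
  refine Finset.sum_congr rfl (fun i hi => ?_)
  rw [Finset.mem_range] at hi
  rw [PySem.List.pyGetD_natCast]
  split <;> ring

-- ===== VERDICT (by name: the statement is the Claim_ definition above) =====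
theorem calc_northbeams_spec : Claim_equal_calc_northbeams := by
  intro platform _ hpre
  exact pv_ports_eq platform hpre
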